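-- pv_equiv track=rewrite | github.com/ArayikKarapetyan/ROSALIND | 021) Locating Restriction Sites/python_efficient.py | find_reverse_palindromes_efficient
-- ===== SOURCE A (Python) =====
-- def find_reverse_palindromes_efficient(dna, min_len=4, max_len=12):
--     """More efficient palindrome finding."""
--     results = []
--     n = len(dna)
--
--     # Precompute complement for faster lookup
--     complement = {'A': 'T', 'T': 'A', 'C': 'G', 'G': 'C'}
--
--     for i in range(n):
--         # For each position, check possible palindrome lengths
--         for length in range(min_len, max_len + 1):
--             if i + length > n:
--                 break
--
--             # Check palindrome property
--             is_palindrome = True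
--             half_length = length // 2
--
--             for k in range(half_length):
--                 left = dna[i + k]
--                 right = dna[i + length - 1 - k]
--
--                 if complement[left] != right:
--                     is_palindrome = False
--                     break
--
--             if is_palindrome:
--                 results.append((i + 1, length))
--
--     return results
-- ===== SOURCE B (Python) =====
-- def find_reverse_palindromes_efficient(dna, min_len=4, max_len=12):
--     """Precompute the reverse complement once; a window is a reverse palindrome
--     iff its first half equals the matching slice of the reverse complement."""
--     comp = {'A': 'T', 'T': 'A', 'C': 'G', 'G': 'C'}
--     n = len(dna)
--     rc = ''.join(comp.get(c, c) for c in reversed(dna))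
--     results = []
--     for i in range(n):
--         for L in range(min_len, min(max_len, n - i) + 1):
--             h = max(0, L // 2)  # nonpositive lengths have no pairs to check
--             if dna[i:i+h] == rc[n-i-L:n-i-L+h]:
--                 results.append((i + 1, L))
--     return results
-- ===== Notes on version B (the rewrite author's own statement) =====
-- stated objective: alternative
-- what changed: B precomputes the reverse complement of the whole string once and tests each window with a single slice comparison of its first half against the matching slice of that reverse complement, so A's inner per-character loop with complement-dict lookups disappears; the length loop is capped arithmetically instead of using A's break.
-- outside the precondition, e.g. on find_reverse_palindromes_efficient('AAX', 2, 2): A returns [], B returns []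
import Mathlib
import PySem

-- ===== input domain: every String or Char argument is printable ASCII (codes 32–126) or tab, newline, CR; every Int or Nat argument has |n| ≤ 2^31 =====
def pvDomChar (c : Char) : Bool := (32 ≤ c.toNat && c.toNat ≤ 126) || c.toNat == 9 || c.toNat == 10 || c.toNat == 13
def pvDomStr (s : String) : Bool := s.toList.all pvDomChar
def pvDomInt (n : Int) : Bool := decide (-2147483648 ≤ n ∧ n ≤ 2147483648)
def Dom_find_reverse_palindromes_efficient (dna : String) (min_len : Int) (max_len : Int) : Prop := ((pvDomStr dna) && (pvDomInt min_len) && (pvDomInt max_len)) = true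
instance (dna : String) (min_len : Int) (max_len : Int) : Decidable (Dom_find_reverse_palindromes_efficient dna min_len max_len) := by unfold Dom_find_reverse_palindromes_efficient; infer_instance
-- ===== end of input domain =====

-- B precomputes the reverse complement of the string once and tests each window by one
-- slice comparison of its first half, instead of A's inner per-character loop with
-- complement-dict lookups (alternative decomposition; not claimed faster).

-- ===== PORT A =====
-- complement = {'A': 'T', 'T': 'A', 'C': 'G', 'G': 'C'}
def pvComp : PySem.Dict Char Char :=
  (((PySem.Dict.empty.insert 'A' 'T').insert 'T' 'A').insert 'C' 'G').insert 'G' 'C'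

-- 'for k in range(half_length)' with its break; complement[left] ported as getD —
-- exact under Pre_ (every char this lookup can see is A/C/G/T there)
def pvAIsPal (s : List Char) (i length : Int) : List Int → Bool
  | [] => true
  | k :: rest =>
    let left := PySem.List.pyGetD s (i + k) ' '
    let right := PySem.List.pyGetD s (i + length - 1 - k) ' '
    if pvComp.getD left ' ' ≠ right then false
    else pvAIsPal s i length rest

-- 'for length in range(min_len, max_len + 1)' with its break, walked with a counter and
-- fuel (= the range's length) so the break stays O(1); results.append is ported with a
-- cons accumulator reversed once at the end (same list, O(1) per append)
def pvALens (s : List Char) (n i : Int) : Int → Nat → List (Int × Int) → List (Int × Int)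
  | _, 0, acc => acc
  | L, fuel + 1, acc =>
    if i + L > n then acc
    else
      let half := PySem.Int.floordiv L 2
      if pvAIsPal s i L (PySem.List.pyRange 0 half 1) then
        pvALens s n i (L + 1) fuel ((i + 1, L) :: acc)
      else
        pvALens s n i (L + 1) fuel acc

def find_reverse_palindromes_efficient (dna : String) (min_len : Int) (max_len : Int) : List (Int × Int) :=
  let s := dna.toList
  let n : Int := PySem.Str.len dna
  ((PySem.List.pyRange 0 n 1).foldl
    (fun results i => pvALens s n i min_len (max_len + 1 - min_len).toNat results) []).reverse

-- ===== PORT B =====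
-- comp.get(c, c)
def pvCompGet (c : Char) : Char := pvComp.getD c c

def find_reverse_palindromes_efficient_alt (dna : String) (min_len : Int) (max_len : Int) : List (Int × Int) :=
  let s := dna.toList
  let n : Int := PySem.Str.len dna
  let rc : List Char := s.reverse.map pvCompGet
  -- results.append ported with a cons accumulator reversed once at the end (same list)
  ((PySem.List.pyRange 0 n 1).foldl
    (fun results i =>
      (PySem.List.pyRange min_len (min max_len (n - i) + 1) 1).foldl
        (fun res L =>
          let h : Int := max 0 (PySem.Int.floordiv L 2)
          if PySem.List.slice s (some i) (some (i + h))
              == PySem.List.slice rc (some (n - i - L)) (some (n - i - L + h))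
          then (i + 1, L) :: res
          else res)
        results)
    []).reverse

-- ===== PRECONDITION & SPEC =====
-- Pre_ admits inputs on which A performs no complement lookup (no checkable length fits),
-- and otherwise requires dna to be all A/C/G/T: on other strings A's complement[left] may
-- raise KeyError, and whether it raises or returns depends on which characters its
-- left-to-right scan looks up before an early break — an artefact of A's implementation
-- (it also excludes some inputs where A happens to return, e.g. ("AAX", 2, 2)).
def Pre_find_reverse_palindromes_efficient (dna : String) (min_len : Int) (max_len : Int) : Prop :=
  dna.toList.all (fun c => c == 'A' || c == 'C' || c == 'G' || c == 'T') = true ∨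
  min max_len (PySem.Str.len dna) < max min_len 2
instance (dna : String) (min_len : Int) (max_len : Int) : Decidable (Pre_find_reverse_palindromes_efficient dna min_len max_len) := by unfold Pre_find_reverse_palindromes_efficient; infer_instance

def pvWitness_find_reverse_palindromes_efficient : String × Int × Int := ("ACGT", 4, 4)

def Spec_find_reverse_palindromes_efficient (dna : String) (min_len : Int) (max_len : Int) (out : List (Int × Int)) : Prop := out = find_reverse_palindromes_efficient_alt dna min_len max_len
instance (dna : String) (min_len : Int) (max_len : Int) (out : List (Int × Int)) : Decidable (Spec_find_reverse_palindromes_efficient dna min_len max_len out) := by unfold Spec_find_reverse_palindromes_efficient; infer_instance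

-- ===== CLAIM (what is proved, stated in full; the proofs are below) =====
def Claim_equal_find_reverse_palindromes_efficient : Prop := ∀ (dna : String) (min_len : Int) (max_len : Int), Dom_find_reverse_palindromes_efficient dna min_len max_len → Pre_find_reverse_palindromes_efficient dna min_len max_len → Spec_find_reverse_palindromes_efficient dna min_len max_len (find_reverse_palindromes_efficient dna min_len max_len)

-- ===== LEMMAS AND PROOFS =====

lemma pvAIsPal_eq_all (s : List Char) (i L : Int) (ks : List Int) :
    pvAIsPal s i L ks =
      ks.all (fun k =>
        pvComp.getD (PySem.List.pyGetD s (i + k) ' ') ' '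
          == PySem.List.pyGetD s (i + L - 1 - k) ' ') := by
  induction ks with
  | nil => rfl
  | cons k rest ih =>
      simp only [pvAIsPal, List.all_cons, ih]
      by_cases h : pvComp.getD (PySem.List.pyGetD s (i + k) ' ') ' ' = PySem.List.pyGetD s (i + L - 1 - k) ' '
      · simp [h]
      · simp [h]


lemma pvComp_flip (a b : Char)
    (ha : a = 'A' ∨ a = 'C' ∨ a = 'G' ∨ a = 'T')
    (hb : b = 'A' ∨ b = 'C' ∨ b = 'G' ∨ b = 'T') :
    (pvComp.getD a ' ' == b) = (a == pvCompGet b) := by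
  rcases ha with rfl | rfl | rfl | rfl <;> rcases hb with rfl | rfl | rfl | rfl <;> decide


lemma pvCheck_eq (s : List Char) (i L : Int) (hi : 0 ≤ i)
    (hiL : i + L ≤ (s.length : Int))
    (hACGT : 2 ≤ L → ∀ c ∈ s, c = 'A' ∨ c = 'C' ∨ c = 'G' ∨ c = 'T') :
    pvAIsPal s i L (PySem.List.pyRange 0 (PySem.Int.floordiv L 2) 1) =
      (PySem.List.slice s (some i) (some (i + max 0 (PySem.Int.floordiv L 2)))
        == PySem.List.slice (s.reverse.map pvCompGet)
             (some ((s.length : Int) - i - L))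
             (some ((s.length : Int) - i - L + max 0 (PySem.Int.floordiv L 2)))) := by
  have h0nn : 0 ≤ max 0 (PySem.Int.floordiv L 2) := le_max_left _ _
  have hj : 0 ≤ (s.length : Int) - i - L := by omega
  rw [pvAIsPal_eq_all,
      PySem.List.slice_toNat s hi (by omega),
      PySem.List.slice_toNat (s.reverse.map pvCompGet) hj (by omega)]
  by_cases hL2 : L < 2
  · have hlt : PySem.Int.floordiv L 2 < 1 := by
      rw [PySem.Int.floordiv_lt_iff_lt_mul (by omega)]; omega
    have hmax : max 0 (PySem.Int.floordiv L 2) = 0 := by omega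
    rw [PySem.List.pyRange_one_eq_nil (by omega), hmax]
    have e1 : (i + 0).toNat - i.toNat = 0 := by omega
    have e2 : ((s.length:Int) - i - L + 0).toNat - ((s.length:Int) - i - L).toNat = 0 := by omega
    rw [e1, e2]
    simp
  · simp only [not_lt] at hL2
    have h01 : 1 ≤ PySem.Int.floordiv L 2 := by
      rw [PySem.Int.le_floordiv_iff_mul_le (by omega)]; omega
    have hdm := PySem.Int.floordiv_mul_add_mod L 2
    have hm0 : PySem.Int.mod L 2 ≥ 0 := PySem.Int.mod_nonneg L (by omega)
    have hm1 : PySem.Int.mod L 2 < 2 := PySem.Int.mod_lt L (by omega)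
    have hmax : max 0 (PySem.Int.floordiv L 2) = PySem.Int.floordiv L 2 := by omega
    rw [hmax]
    set h0 : Int := PySem.Int.floordiv L 2 with hh0def
    have e1 : (i + h0).toNat - i.toNat = h0.toNat := by omega
    have e2 : ((s.length:Int) - i - L + h0).toNat - ((s.length:Int) - i - L).toNat = h0.toNat := by omega
    rw [e1, e2]
    have hACGT' := hACGT hL2
    have hb1 : i.toNat + L.toNat ≤ s.length := by omega
    have hb2 : 2 * h0.toNat ≤ L.toNat := by omega
    have hb3 : L.toNat ≤ 2 * h0.toNat + 1 := by omega
    have hb4 : 1 ≤ h0.toNat := by omega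
    have hjN : ((s.length:Int) - i - L).toNat = s.length - i.toNat - L.toNat := by omega
    rw [hjN]
    have hlen1 : (List.take h0.toNat (List.drop i.toNat s)).length = h0.toNat := by
      simp [List.length_take, List.length_drop]; omega
    have hlen2 : (List.take h0.toNat (List.drop (s.length - i.toNat - L.toNat) (s.reverse.map pvCompGet))).length = h0.toNat := by
      simp [List.length_take, List.length_drop]; omega
    rw [Bool.eq_iff_iff]
    simp only [List.all_eq_true, PySem.List.mem_pyRange_one, beq_iff_eq]
    constructor
    · intro hall
      apply List.ext_getElem (by rw [hlen1, hlen2])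
      intro k hk1 hk2
      have hk : k < h0.toNat := by rwa [hlen1] at hk1
      have hx := hall (k : Int) ⟨by omega, by omega⟩
      rw [PySem.List.pyGetD_eq_getElem s (i := i + (k:Int)) ' ' (by omega) (by omega),
          PySem.List.pyGetD_eq_getElem s (i := i + L - 1 - (k:Int)) ' ' (by omega) (by omega)] at hx
      simp only [show (i + (k:Int)).toNat = i.toNat + k from by omega,
                 show (i + L - 1 - (k:Int)).toNat = i.toNat + L.toNat - 1 - k from by omega] at hx
      simp only [List.getElem_take, List.getElem_drop, List.getElem_map, List.getElem_reverse]
      simp only [show s.length - 1 - (s.length - i.toNat - L.toNat + k) = i.toNat + L.toNat - 1 - k from by omega]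
      have hflip := pvComp_flip (s[i.toNat + k]'(by omega)) (s[i.toNat + L.toNat - 1 - k]'(by omega))
        (hACGT' _ (List.getElem_mem _)) (hACGT' _ (List.getElem_mem _))
      rw [Bool.eq_iff_iff] at hflip
      simp only [beq_iff_eq] at hflip
      exact hflip.mp hx
    · intro heq k hkmem
      obtain ⟨hk0, hkh⟩ := hkmem
      have hkN : k.toNat < h0.toNat := by omega
      have hk1 : k.toNat < (List.take h0.toNat (List.drop i.toNat s)).length := by rw [hlen1]; omega
      have hel := List.getElem_of_eq heq hk1
      simp only [List.getElem_take, List.getElem_drop, List.getElem_map, List.getElem_reverse] at hel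
      simp only [show s.length - 1 - (s.length - i.toNat - L.toNat + k.toNat) = i.toNat + L.toNat - 1 - k.toNat from by omega] at hel
      rw [PySem.List.pyGetD_eq_getElem s (i := i + k) ' ' (by omega) (by omega),
          PySem.List.pyGetD_eq_getElem s (i := i + L - 1 - k) ' ' (by omega) (by omega)]
      simp only [show (i + k).toNat = i.toNat + k.toNat from by omega,
                 show (i + L - 1 - k).toNat = i.toNat + L.toNat - 1 - k.toNat from by omega]
      have hflip := pvComp_flip (s[i.toNat + k.toNat]'(by omega)) (s[i.toNat + L.toNat - 1 - k.toNat]'(by omega))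
        (hACGT' _ (List.getElem_mem _)) (hACGT' _ (List.getElem_mem _))
      rw [Bool.eq_iff_iff] at hflip
      simp only [beq_iff_eq] at hflip
      exact hflip.mpr hel

lemma pvALens_eq_foldl (s : List Char) (n i : Int) :
    ∀ (m : Nat) (a b : Int), (b - a).toNat = m → ∀ acc,
      pvALens s n i a m acc =
        (PySem.List.pyRange a (min b (n - i + 1)) 1).foldl
          (fun acc L =>
            if pvAIsPal s i L (PySem.List.pyRange 0 (PySem.Int.floordiv L 2) 1) then
              (i + 1, L) :: acc
            else acc)
          acc := by
  intro m
  induction m with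
  | zero =>
      intro a b hm acc
      have hba : b ≤ a := by omega
      rw [PySem.List.pyRange_one_eq_nil (by omega : min b (n - i + 1) ≤ a)]
      rfl
  | succ m ih =>
      intro a b hm acc
      by_cases hbr : i + a > n
      · have : min b (n - i + 1) ≤ a := by omega
        rw [PySem.List.pyRange_one_eq_nil this]
        simp only [pvALens, if_pos hbr]
        rfl
      · have ha' : a < min b (n - i + 1) := by omega
        rw [PySem.List.pyRange_one_cons ha', List.foldl_cons]
        simp only [pvALens, if_neg hbr]
        split
        · exact ih (a + 1) b (by omega) _
        · exact ih (a + 1) b (by omega) _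

-- ===== VERDICT (by name: the statement is the Claim_ definition above) =====
theorem find_reverse_palindromes_efficient_spec : Claim_equal_find_reverse_palindromes_efficient := by
  intro dna min_len max_len hdom hpre
  unfold Spec_find_reverse_palindromes_efficient
  simp only [find_reverse_palindromes_efficient, find_reverse_palindromes_efficient_alt]
  unfold Pre_find_reverse_palindromes_efficient at hpre
  rw [PySem.Str.len_eq] at hpre ⊢
  set s := dna.toList with hs
  apply congrArg List.reverse
  apply PySem.List.foldl_congr_mem
  intro acc i hi
  rw [PySem.List.mem_pyRange_one] at hi
  rw [pvALens_eq_foldl s (s.length : Int) i ((max_len + 1) - min_len).toNat min_len (max_len + 1) rfl acc]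
  have hmm : min (max_len + 1) ((s.length : Int) - i + 1) = min max_len ((s.length : Int) - i) + 1 := by omega
  rw [hmm]
  apply PySem.List.foldl_congr_mem
  intro acc2 L hL
  rw [PySem.List.mem_pyRange_one] at hL
  rw [pvCheck_eq s i L (by omega) (by omega)
    (by
      intro h2L c hc
      rcases hpre with hall | hlt
      · have h' := List.all_eq_true.mp hall c hc
        simp only [Bool.or_eq_true, beq_iff_eq] at h'
        tauto
      · exfalso; omega)]
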